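-- pv_equiv track=rewrite | github.com/N8Brooks/data_visualization | sorting/sorting.py | msd_sort
-- ===== SOURCE A (Python) =====
-- def msd_sort(arr, lo = None, hi = None, digit = None):
--     """
--     radix sort using most significant digit (msd)
--     O(d(n + k)) where b is base (10), d is log_b(largest), n is length of arr
--     """
--     if lo is None or hi is None or digit is None:
--         lo, hi = 0, len(arr)
--         tmp = max(arr)
--         digit = 1
--         while tmp >= 10:
--             tmp //= 10
--             digit *= 10
--
--     if digit == 0 or hi - lo < 2:
--         return
--
--     tmp = arr[lo:hi]
--     counts = [0] * 10
--     for x in tmp: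
--         counts[(x // digit) % 10] += 1
--     for i in range(1, len(counts)):
--         counts[i] += counts[i - 1]
--     not_set = set(range(lo, hi))
--     for x in tmp:
--         index = (x // digit) % 10
--         counts[index] -= 1
--         i = counts[index] + lo
--         not_set.remove(i)
--         j = next((j for j, y in enumerate(arr) if y == x and j in not_set), i)
--         arr[i], arr[j] = x, arr[i]
--         yield arr
--
--     i = lo
--     pl = (arr[i] // digit) % 10
--     for j in range(i + 1, hi):
--         if (arr[j] // digit) % 10 != pl:
--             for sub in msd_sort(arr, i, j, digit // 10):
--                 yield sub
--             i = j
--             pl = (arr[j] // digit) % 10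
--     for sub in msd_sort(arr, i, hi, digit // 10):
--         yield sub
-- ===== SOURCE B (Python) =====
-- def msd_sort(arr, lo = None, hi = None, digit = None):
--     if lo is None or hi is None or digit is None:
--         lo, hi = 0, len(arr)
--         tmp = max(arr)
--         digit = 1
--         while tmp >= 10:
--             tmp //= 10
--             digit *= 10
--     stack = [(lo, hi, digit)]
--     while stack:
--         lo, hi, digit = stack.pop()
--         if digit == 0 or hi - lo < 2:
--             continue
--         tmp = arr[lo:hi]
--         counts = [0] * 10
--         for x in tmp:
--             counts[(x // digit) % 10] += 1
--         for i in range(1, len(counts)):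
--             counts[i] += counts[i - 1]
--         not_set = set(range(lo, hi))
--         for x in tmp:
--             index = (x // digit) % 10
--             counts[index] -= 1
--             i = counts[index] + lo
--             not_set.remove(i)
--             j = next((j for j, y in enumerate(arr) if y == x and j in not_set), i)
--             arr[i], arr[j] = x, arr[i]
--             yield arr
--         children = []
--         i = lo
--         pl = (arr[i] // digit) % 10
--         for j in range(i + 1, hi):
--             d = (arr[j] // digit) % 10
--             if d != pl:
--                 children.append((i, j, digit // 10))
--                 i = j
--                 pl = d
--         children.append((i, hi, digit // 10))
--         stack.extend(reversed(children))
-- ===== Notes on version B (the rewrite author's own statement) =====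
-- stated objective: alternative
-- what changed: The recursive 'yield from' DFS over digit groups is replaced by an iterative explicit work-stack of (lo, hi, digit) ranges: each popped range runs the same counting-sort partition pass, then its digit-group sub-ranges are pushed in reverse so they are processed left-to-right, yielding the identical pre-order sequence of array states without recursion.
-- outside the precondition, e.g. on msd_sort([1, 2, 3], -1, 2, 1): A returns [], B returns []; on msd_sort([3, 1, 2], -3, 2, 1): A returns [[1, 3, 2], [1, 3, 2]], B returns [[1, 3, 2], [1, 3, 2]]
import Mathlib
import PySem

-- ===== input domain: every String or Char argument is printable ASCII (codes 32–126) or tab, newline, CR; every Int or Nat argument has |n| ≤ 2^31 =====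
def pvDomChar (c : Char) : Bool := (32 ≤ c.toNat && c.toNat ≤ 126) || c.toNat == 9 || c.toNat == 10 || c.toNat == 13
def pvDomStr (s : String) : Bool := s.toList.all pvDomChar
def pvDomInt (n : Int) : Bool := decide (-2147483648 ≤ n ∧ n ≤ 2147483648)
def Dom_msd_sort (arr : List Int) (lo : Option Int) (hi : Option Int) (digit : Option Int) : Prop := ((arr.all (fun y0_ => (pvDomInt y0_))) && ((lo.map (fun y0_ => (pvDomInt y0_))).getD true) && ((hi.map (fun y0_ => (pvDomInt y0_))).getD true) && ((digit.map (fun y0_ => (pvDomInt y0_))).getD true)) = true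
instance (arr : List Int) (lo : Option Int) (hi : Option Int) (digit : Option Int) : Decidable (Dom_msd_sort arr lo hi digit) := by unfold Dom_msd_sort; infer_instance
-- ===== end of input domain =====

-- B replaces A's recursive DFS over digit groups by an explicit work-stack of (lo, hi, digit)
-- ranges popped left-to-right (alternative decomposition, same cost); both mutate `arr` in
-- place in Python — the equivalence proved here is about the yielded sequence of array states.


-- ===== PORT A =====

-- (x // digit) % 10
def pyBucket (x d : Int) : Int := PySem.Int.mod (PySem.Int.floordiv x d) 10

-- the default-argument block 'lo, hi = 0, len(arr); tmp = max(arr); digit = 1; while tmp >= 10: …'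
-- (identical in both Python sources).  max(arr) raises ValueError on []: excluded by Pre_, the
-- .getD 0 default is never reached on admitted inputs.
def initDigit (tmp digit : Int) : Int :=
  if 10 ≤ tmp then initDigit (PySem.Int.floordiv tmp 10) (digit * 10) else digit
  termination_by tmp.toNat
  decreasing_by
    rename_i h
    rw [PySem.Int.floordiv_eq_ediv_of_pos (by omega)]
    omega

def msdInit (arr : List Int) (lo hi digit : Option Int) : Int × Int × Int :=
  match lo, hi, digit with
  | some l, some h, some d => (l, h, d)
  | _, _, _ => (0, (arr.length : Int), initDigit ((PySem.List.max? arr (fun y => y)).getD 0) 1)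

-- counts[(x // digit) % 10] += 1  over tmp
def buildCounts (tmp : List Int) (d : Int) : List Int :=
  tmp.foldl (fun c x =>
    PySem.List.pySetD c (pyBucket x d) (PySem.List.pyGetD c (pyBucket x d) 0 + 1))
    (List.replicate 10 0)

-- for i in range(1, len(counts)): counts[i] += counts[i-1]
def prefixCounts (c : List Int) : List Int :=
  (PySem.List.pyRange 1 (c.length : Int) 1).foldl (fun c i =>
    PySem.List.pySetD c i (PySem.List.pyGetD c i 0 + PySem.List.pyGetD c (i - 1) 0)) c

-- j = next((j for j, y in enumerate(arr) if y == x and j in not_set), i)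
def findJ (a : List Int) (ns : PySem.Set Int) (x i : Int) : Int :=
  match (PySem.List.enumerate a 0).find? (fun p => p.2 == x && PySem.Set.contains ns p.1) with
  | some p => p.1
  | none => i

-- the counting-sort partition pass with one yield per element (identical block in both Python
-- sources, so shared by both ports); returns (yielded states, arr after the pass).
-- not_set.remove(i) is ported as Set.discard: exact because i ∈ not_set on every admitted input
-- (a KeyError would otherwise abort A, and such inputs are outside Pre_).
def partitionPass (arr : List Int) (lo hi d : Int) : List (List Int) × List Int :=
  let tmp := PySem.List.slice arr (some lo) (some hi)
  let st := tmp.foldl (fun (st : List Int × PySem.Set Int × List (List Int) × List Int) x =>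
      let counts := st.1
      let ns := st.2.1
      let states := st.2.2.1
      let a := st.2.2.2
      let ix := pyBucket x d
      let counts := PySem.List.pySetD counts ix (PySem.List.pyGetD counts ix 0 - 1)
      let i := PySem.List.pyGetD counts ix 0 + lo
      let ns := PySem.Set.discard ns i
      let j := findJ a ns x i
      let v := PySem.List.pyGetD a i 0
      let a := PySem.List.pySetD a i x
      let a := PySem.List.pySetD a j v
      (counts, ns, states ++ [a], a))
    (prefixCounts (buildCounts tmp d), PySem.Set.ofList (PySem.List.pyRange lo hi 1), [], arr)
  (st.2.2.1, st.2.2.2)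

-- A's body: guard, partition pass, then the boundary scan interleaved with recursive calls
-- ('yield from msd_sort(arr, i, j, digit // 10)').  The fuel argument only totalizes the
-- recursion; on admitted inputs it never runs out (digit strictly shrinks under // 10).
mutual
def recA (f : Nat) (arr : List Int) (lo hi d : Int) : List (List Int) × List Int :=
  match f with
  | 0 => ([], arr)
  | f + 1 =>
    if d = 0 ∨ hi - lo < 2 then ([], arr)
    else
      let r1 := partitionPass arr lo hi d
      let pl := pyBucket (PySem.List.pyGetD r1.2 lo 0) d
      let r2 := scanA f (PySem.List.pyRange (lo + 1) hi 1) lo pl d r1.2 r1.1 hi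
      let r3 := recA f r2.2.2.2 r2.1 hi (PySem.Int.floordiv d 10)
      (r2.2.2.1 ++ r3.1, r3.2)
  termination_by (f, 0)

-- for j in range(i+1, hi): if (arr[j]//digit)%10 != pl: yield from msd_sort(arr, i, j, digit//10); …
def scanA (f : Nat) (js : List Int) (i pl d : Int) (a : List Int) (s : List (List Int)) (hi : Int) :
    Int × Int × List (List Int) × List Int :=
  match js with
  | [] => (i, pl, s, a)
  | j :: js =>
    if pyBucket (PySem.List.pyGetD a j 0) d ≠ pl then
      let r := recA f a i j (PySem.Int.floordiv d 10)
      scanA f js j (pyBucket (PySem.List.pyGetD r.2 j 0) d) d r.2 (s ++ r.1) hi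
    else scanA f js i pl d a s hi
  termination_by (f, js.length + 1)
end

-- Python's 'yield arr' yields the arr OBJECT: consuming list(msd_sort(...)) gives the final
-- array once per yield (aliasing); the port returns that observable value.
def msd_sort (arr : List Int) (lo : Option Int) (hi : Option Int) (digit : Option Int) : List (List Int) :=
  let t := msdInit arr lo hi digit
  let r := recA (t.2.2.toNat + 1) arr t.1 t.2.1 t.2.2
  r.1.map (fun _ => r.2)

-- ===== PORT B =====

-- B's boundary scan: collect the digit-group sub-ranges of [i, hi) of the partitioned array
def scanB (js : List Int) (i pl d : Int) (cs : List (Int × Int × Int)) (a1 : List Int) :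
    Int × Int × List (Int × Int × Int) :=
  match js with
  | [] => (i, pl, cs)
  | j :: js =>
    let dg := pyBucket (PySem.List.pyGetD a1 j 0) d
    if dg ≠ pl then scanB js j dg d (cs ++ [(i, j, PySem.Int.floordiv d 10)]) a1
    else scanB js i pl d cs a1

def childrenOf (a1 : List Int) (lo hi d : Int) : List (Int × Int × Int) :=
  let pl := pyBucket (PySem.List.pyGetD a1 lo 0) d
  let r := scanB (PySem.List.pyRange (lo + 1) hi 1) lo pl d [] a1
  r.2.2 ++ [(r.1, hi, PySem.Int.floordiv d 10)]

-- the work-stack loop: 'while stack: lo, hi, digit = stack.pop(); …; stack.extend(reversed(children))'.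
-- The stack top is the list head, so extend(reversed(children)) is 'children ++ stack'.
-- The fuel only totalizes the while loop; on admitted inputs it never runs out.
def loopB (f : Nat) (stack : List (Int × Int × Int)) (arr : List Int) :
    List (List Int) × List Int :=
  match f, stack with
  | 0, _ => ([], arr)
  | _ + 1, [] => ([], arr)
  | f + 1, (lo, hi, d) :: stack =>
    if d = 0 ∨ hi - lo < 2 then loopB f stack arr
    else
      let r1 := partitionPass arr lo hi d
      let r2 := loopB f (childrenOf r1.2 lo hi d ++ stack) r1.2
      (r1.1 ++ r2.1, r2.2)

-- B also yields the arr object itself, with the same aliasing as A (see above).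
def msd_sort_alt (arr : List Int) (lo : Option Int) (hi : Option Int) (digit : Option Int) : List (List Int) :=
  let t := msdInit arr lo hi digit
  let r := loopB (1 + arr.length * (t.2.2.toNat + 1)) [(t.1, t.2.1, t.2.2)] arr
  r.1.map (fun _ => r.2)

-- ===== PRECONDITION & SPEC =====
-- Pre_ excludes (i) arr = [] when any bound is defaulted (max(arr) raises ValueError),
-- (ii) explicit non-trivial calls with digit < 0 (A recurses forever: RecursionError) or with
-- lo/hi outside [0, len(arr)] — there A usually raises IndexError/KeyError and on the remaining
-- inputs its negative-slice/negative-index wraparound result is accidental (B happens to agree).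
def Pre_msd_sort (arr : List Int) (lo : Option Int) (hi : Option Int) (digit : Option Int) : Prop :=
  if lo.isSome ∧ hi.isSome ∧ digit.isSome then
    let l := lo.getD 0
    let h := hi.getD 0
    let d := digit.getD 0
    d = 0 ∨ h - l < 2 ∨ (0 < d ∧ 0 ≤ l ∧ h ≤ (arr.length : Int))
  else arr ≠ []

instance (arr : List Int) (lo : Option Int) (hi : Option Int) (digit : Option Int) : Decidable (Pre_msd_sort arr lo hi digit) := by
  unfold Pre_msd_sort; infer_instance

def pvWitness_msd_sort : List Int × Option Int × Option Int × Option Int :=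
  ([38, 7, 412, 7, 50], none, none, none)

def Spec_msd_sort (arr : List Int) (lo : Option Int) (hi : Option Int) (digit : Option Int) (out : List (List Int)) : Prop := out = msd_sort_alt arr lo hi digit
instance (arr : List Int) (lo : Option Int) (hi : Option Int) (digit : Option Int) (out : List (List Int)) : Decidable (Spec_msd_sort arr lo hi digit out) := by unfold Spec_msd_sort; infer_instance

-- ===== CLAIM (what is proved, stated in full; the proofs are below) =====
def Claim_equal_msd_sort : Prop := ∀ (arr : List Int) (lo : Option Int) (hi : Option Int) (digit : Option Int), Dom_msd_sort arr lo hi digit → Pre_msd_sort arr lo hi digit → Spec_msd_sort arr lo hi digit (msd_sort arr lo hi digit)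


-- ===== LEMMAS AND PROOFS =====

-- ---- small bridges ----

theorem pyBucket_nonneg (x d : Int) : 0 ≤ pyBucket x d :=
  PySem.Int.mod_nonneg (PySem.Int.floordiv x d) (by norm_num)

theorem pyBucket_lt (x d : Int) : pyBucket x d < 10 :=
  PySem.Int.mod_lt (PySem.Int.floordiv x d) (by norm_num)

-- bucket as a Nat index
def bIx (x d : Int) : Nat := (pyBucket x d).toNat

theorem bIx_lt (x d : Int) : bIx x d < 10 := by
  have h1 := pyBucket_lt x d
  have h2 := pyBucket_nonneg x d
  unfold bIx; omega

theorem getD_set_ne (xs : List Int) (n k : Nat) (v : Int) (h : k ≠ n) :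
    (xs.set n v).getD k 0 = xs.getD k 0 := by
  simp [List.getD, List.getElem?_set_ne (Ne.symm h)]

theorem getD_set_self (xs : List Int) (n : Nat) (v : Int) (h : n < xs.length) :
    (xs.set n v).getD n 0 = v := by
  simp [List.getD, h]

theorem pyGetD_toNat (xs : List Int) (i : Int) (h0 : 0 ≤ i) (h1 : i < (xs.length : Int)) :
    PySem.List.pyGetD xs i 0 = xs.getD i.toNat 0 := by
  rw [PySem.List.pyGetD_eq_getElem xs 0 h0 h1]
  rw [List.getD_eq_getElem xs 0 (by omega)]

theorem pySetD_toNat (xs : List Int) (i : Int) (v : Int) (h0 : 0 ≤ i) :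
    PySem.List.pySetD xs i v = xs.set i.toNat v :=
  PySem.List.pySetD_of_nonneg xs v h0

-- ---- counting-sort counts characterisation ----

def cntB (s : List Int) (d : Int) (b : Nat) : Int := (s.countP (fun x => bIx x d = b) : Int)

def SBelow (s : List Int) (d : Int) (b : Nat) : Int := (s.countP (fun x => bIx x d < b) : Int)

theorem SBelow_zero (s : List Int) (d : Int) : SBelow s d 0 = 0 := by
  simp [SBelow]

theorem SBelow_succ (s : List Int) (d : Int) (b : Nat) :
    SBelow s d (b + 1) = SBelow s d b + cntB s d b := by
  induction s with
  | nil => simp [SBelow, cntB]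
  | cons y t ih =>
    simp only [SBelow, cntB, List.countP_cons] at *
    by_cases h1 : bIx y d < b
    · simp [h1, show bIx y d < b + 1 by omega, show ¬ (bIx y d = b) by omega] at *
      omega
    · by_cases h2 : bIx y d = b
      · simp [h2] at *
        omega
      · simp [h1, h2, show ¬ (bIx y d < b + 1) by omega] at *
        omega

theorem cntB_nonneg (s : List Int) (d : Int) (b : Nat) : 0 ≤ cntB s d b := by
  simp [cntB]

theorem SBelow_nonneg (s : List Int) (d : Int) (b : Nat) : 0 ≤ SBelow s d b := by
  simp [SBelow]

theorem SBelow_le_len (s : List Int) (d : Int) (b : Nat) : SBelow s d b ≤ (s.length : Int) := by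
  simp [SBelow]
  exact_mod_cast List.countP_le_length

theorem cntB_append (s t : List Int) (d : Int) (b : Nat) :
    cntB (s ++ t) d b = cntB s d b + cntB t d b := by
  simp [cntB, List.countP_append]

theorem buildCounts_go (d : Int) :
    ∀ (tmp c : List Int), c.length = 10 →
      ((tmp.foldl (fun c x =>
        PySem.List.pySetD c (pyBucket x d) (PySem.List.pyGetD c (pyBucket x d) 0 + 1)) c).length = 10 ∧
       ∀ b : Nat, b < 10 →
        (tmp.foldl (fun c x =>
          PySem.List.pySetD c (pyBucket x d) (PySem.List.pyGetD c (pyBucket x d) 0 + 1)) c).getD b 0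
          = c.getD b 0 + cntB tmp d b) := by
  intro tmp
  induction tmp with
  | nil => intro c hc; simpa [cntB] using hc
  | cons x t ih =>
    intro c hc
    have hnn := pyBucket_nonneg x d
    have hlt := bIx_lt x d
    have hset : PySem.List.pySetD c (pyBucket x d) (PySem.List.pyGetD c (pyBucket x d) 0 + 1)
        = c.set (bIx x d) (c.getD (bIx x d) 0 + 1) := by
      rw [pySetD_toNat _ _ _ hnn, pyGetD_toNat _ _ hnn (by rw [hc]; exact_mod_cast pyBucket_lt x d)]
      rfl
    simp only [List.foldl_cons, hset]
    have hlen : (c.set (bIx x d) (c.getD (bIx x d) 0 + 1)).length = 10 := by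
      simp [hc]
    obtain ⟨h1, h2⟩ := ih _ hlen
    refine ⟨h1, ?_⟩
    intro b hb
    rw [h2 b hb]
    by_cases hbe : b = bIx x d
    · subst hbe
      rw [getD_set_self _ _ _ (by omega)]
      simp [cntB]
      ring
    · rw [getD_set_ne _ _ _ _ hbe]
      have : ¬ (bIx x d = b) := fun h => hbe h.symm
      simp [cntB, this]

theorem buildCounts_spec (tmp : List Int) (d : Int) :
    (buildCounts tmp d).length = 10 ∧
    ∀ b : Nat, b < 10 → (buildCounts tmp d).getD b 0 = cntB tmp d b := by
  obtain ⟨h1, h2⟩ := buildCounts_go d tmp (List.replicate 10 0) (by simp)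
  refine ⟨h1, ?_⟩
  intro b hb
  unfold buildCounts
  rw [h2 b hb]
  rw [List.getD_replicate]
  · ring
  · exact hb


theorem prefixCounts_spec (tmp : List Int) (d : Int) :
    (prefixCounts (buildCounts tmp d)).length = 10 ∧
    ∀ b : Nat, b < 10 →
      (prefixCounts (buildCounts tmp d)).getD b 0 = SBelow tmp d (b + 1) := by
  obtain ⟨hlen, hval⟩ := buildCounts_spec tmp d
  set cb := buildCounts tmp d with hcb
  clear_value cb
  rcases cb with _ | ⟨c0, _ | ⟨c1, _ | ⟨c2, _ | ⟨c3, _ | ⟨c4, _ | ⟨c5, _ | ⟨c6, _ | ⟨c7, _ | ⟨c8, _ | ⟨c9, _ | ⟨c10, rest⟩⟩⟩⟩⟩⟩⟩⟩⟩⟩⟩ <;>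
    simp only [List.length_cons, List.length_nil] at hlen <;> try omega
  have hpc : prefixCounts [c0,c1,c2,c3,c4,c5,c6,c7,c8,c9] =
      [c0, c1+c0, c2+(c1+c0), c3+(c2+(c1+c0)), c4+(c3+(c2+(c1+c0))), c5+(c4+(c3+(c2+(c1+c0)))),
       c6+(c5+(c4+(c3+(c2+(c1+c0))))), c7+(c6+(c5+(c4+(c3+(c2+(c1+c0)))))),
       c8+(c7+(c6+(c5+(c4+(c3+(c2+(c1+c0))))))), c9+(c8+(c7+(c6+(c5+(c4+(c3+(c2+(c1+c0))))))))] := by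
    simp only [prefixCounts, List.length_cons, List.length_nil]
    rw [show PySem.List.pyRange 1 ((0+1+1+1+1+1+1+1+1+1+1 : Nat) : Int) 1 = [1,2,3,4,5,6,7,8,9] from by decide]
    simp [PySem.List.pySetD, PySem.List.pySet?, PySem.List.pyGetD, PySem.List.pyGet?, PySem.List.pyIdx?]
  have e0 : c0 = cntB tmp d 0 := by simpa using hval 0 (by norm_num)
  have e1 : c1 = cntB tmp d 1 := by simpa using hval 1 (by norm_num)
  have e2 : c2 = cntB tmp d 2 := by simpa using hval 2 (by norm_num)
  have e3 : c3 = cntB tmp d 3 := by simpa using hval 3 (by norm_num)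
  have e4 : c4 = cntB tmp d 4 := by simpa using hval 4 (by norm_num)
  have e5 : c5 = cntB tmp d 5 := by simpa using hval 5 (by norm_num)
  have e6 : c6 = cntB tmp d 6 := by simpa using hval 6 (by norm_num)
  have e7 : c7 = cntB tmp d 7 := by simpa using hval 7 (by norm_num)
  have e8 : c8 = cntB tmp d 8 := by simpa using hval 8 (by norm_num)
  have e9 : c9 = cntB tmp d 9 := by simpa using hval 9 (by norm_num)
  have sb : ∀ b : Nat, SBelow tmp d (b + 1) = SBelow tmp d b + cntB tmp d b := SBelow_succ tmp d
  constructor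
  · rw [hpc]; rfl
  · intro b hb
    subst e0 e1 e2 e3 e4 e5 e6 e7 e8 e9
    interval_cases b <;>
      simp only [hpc, List.getD_cons_zero, List.getD_cons_succ] <;>
      simp [sb, SBelow_zero] <;> ring

-- ---- partition pass confinement ----

-- the partition fold keeps `a` unchanged outside [lo, hi) — invariant proof over the suffix
theorem partition_fold_conf (arr : List Int) (lo hi d : Int) (tmp : List Int)
    (hlo : 0 ≤ lo) (hhi : hi ≤ (arr.length : Int)) (htl : (tmp.length : Int) ≤ hi - lo) :
    ∀ (s p : List Int) (counts : List Int) (ns : PySem.Set Int)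
      (states : List (List Int)) (a : List Int),
      tmp = p ++ s →
      counts.length = 10 →
      (∀ b : Nat, b < 10 → counts.getD b 0 = SBelow tmp d b + cntB s d b) →
      (∀ y ∈ ns, lo ≤ y ∧ y < hi) →
      a.length = arr.length →
      (∀ k : Nat, ((k : Int) < lo ∨ hi ≤ (k : Int)) → a.getD k 0 = arr.getD k 0) →
      ((s.foldl (fun (st : List Int × PySem.Set Int × List (List Int) × List Int) x =>
          let counts := st.1
          let ns := st.2.1
          let states := st.2.2.1
          let a := st.2.2.2
          let ix := pyBucket x d
          let counts := PySem.List.pySetD counts ix (PySem.List.pyGetD counts ix 0 - 1)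
          let i := PySem.List.pyGetD counts ix 0 + lo
          let ns := PySem.Set.discard ns i
          let j := findJ a ns x i
          let v := PySem.List.pyGetD a i 0
          let a := PySem.List.pySetD a i x
          let a := PySem.List.pySetD a j v
          (counts, ns, states ++ [a], a)) (counts, ns, states, a)).2.2.2.length = arr.length ∧
       ∀ k : Nat, ((k : Int) < lo ∨ hi ≤ (k : Int)) →
        (s.foldl (fun (st : List Int × PySem.Set Int × List (List Int) × List Int) x =>
          let counts := st.1
          let ns := st.2.1
          let states := st.2.2.1
          let a := st.2.2.2
          let ix := pyBucket x d
          let counts := PySem.List.pySetD counts ix (PySem.List.pyGetD counts ix 0 - 1)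
          let i := PySem.List.pyGetD counts ix 0 + lo
          let ns := PySem.Set.discard ns i
          let j := findJ a ns x i
          let v := PySem.List.pyGetD a i 0
          let a := PySem.List.pySetD a i x
          let a := PySem.List.pySetD a j v
          (counts, ns, states ++ [a], a)) (counts, ns, states, a)).2.2.2.getD k 0 = arr.getD k 0) := by
  intro s
  induction s with
  | nil =>
    intro p counts ns states a _ _ _ _ hal hag
    exact ⟨hal, hag⟩
  | cons x s' ih =>
    intro p counts ns states a hsu hc10 hcv hns hal hag
    simp only [List.foldl_cons]
    have hnn := pyBucket_nonneg x d
    have hblt := bIx_lt x d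
    have hixv : (pyBucket x d).toNat = bIx x d := rfl
    -- normalise the one step
    have hcset : PySem.List.pySetD counts (pyBucket x d) (PySem.List.pyGetD counts (pyBucket x d) 0 - 1)
        = counts.set (bIx x d) (counts.getD (bIx x d) 0 - 1) := by
      rw [pySetD_toNat _ _ _ hnn, pyGetD_toNat _ _ hnn (by rw [hc10]; exact_mod_cast pyBucket_lt x d)]
      rfl
    set counts' := counts.set (bIx x d) (counts.getD (bIx x d) 0 - 1) with hcounts'
    have hc10' : counts'.length = 10 := by simp [hcounts', hc10]
    -- the new value at the element's bucket
    have hcv' : counts'.getD (bIx x d) 0 = SBelow tmp d (bIx x d) + cntB s' d (bIx x d) := by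
      rw [hcounts', getD_set_self _ _ _ (by omega), hcv (bIx x d) hblt]
      simp [cntB]
      ring
    have hgetc : PySem.List.pyGetD counts' (pyBucket x d) 0 = counts'.getD (bIx x d) 0 := by
      rw [pyGetD_toNat _ _ hnn (by rw [hc10']; exact_mod_cast pyBucket_lt x d)]
      rfl
    -- the write position i is inside [lo, hi)
    have hcnt_le : cntB s' d (bIx x d) + 1 ≤ cntB tmp d (bIx x d) := by
      rw [hsu, cntB_append]
      have : cntB (x :: s') d (bIx x d) = cntB s' d (bIx x d) + 1 := by
        simp [cntB]
      have h0 := cntB_nonneg p d (bIx x d)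
      omega
    have hiub : SBelow tmp d (bIx x d) + cntB s' d (bIx x d) < hi - lo := by
      have h1 : SBelow tmp d (bIx x d) + cntB tmp d (bIx x d) = SBelow tmp d (bIx x d + 1) :=
        (SBelow_succ tmp d (bIx x d)).symm
      have h2 := SBelow_le_len tmp d (bIx x d + 1)
      omega
    have hilb : 0 ≤ SBelow tmp d (bIx x d) + cntB s' d (bIx x d) := by
      have := SBelow_nonneg tmp d (bIx x d)
      have := cntB_nonneg s' d (bIx x d)
      omega
    set iV := counts'.getD (bIx x d) 0 + lo with hiV
    have hiBnd : lo ≤ iV ∧ iV < hi := by rw [hiV, hcv']; omega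
    set ns' := PySem.Set.discard ns iV with hns'
    have hnsB : ∀ y ∈ ns', lo ≤ y ∧ y < hi := by
      intro y hy
      exact hns y ((PySem.Set.mem_discard ns iV y).mp hy).1
    set jV := findJ a ns' x iV with hjV
    have hjBnd : lo ≤ jV ∧ jV < hi := by
      rw [hjV]
      unfold findJ
      cases hfind : (PySem.List.enumerate a 0).find? (fun p => p.2 == x && PySem.Set.contains ns' p.1) with
      | none => exact hiBnd
      | some q =>
        have hq := List.find?_some hfind
        simp only [Bool.and_eq_true, beq_iff_eq] at hq
        exact hnsB q.1 ((PySem.Set.contains_iff ns' q.1).mp hq.2)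
    -- the two writes stay inside [lo, hi)
    have haset : PySem.List.pySetD (PySem.List.pySetD a iV x) jV (PySem.List.pyGetD a iV 0)
        = (a.set iV.toNat x).set jV.toNat (PySem.List.pyGetD a iV 0) := by
      rw [pySetD_toNat _ _ _ (by omega), pySetD_toNat _ _ _ (by omega)]
    have hal' : ((a.set iV.toNat x).set jV.toNat (PySem.List.pyGetD a iV 0)).length = arr.length := by
      simp [hal]
    have hag' : ∀ k : Nat, ((k : Int) < lo ∨ hi ≤ (k : Int)) →
        ((a.set iV.toNat x).set jV.toNat (PySem.List.pyGetD a iV 0)).getD k 0 = arr.getD k 0 := by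
      intro k hk
      rw [getD_set_ne _ _ _ _ (by omega), getD_set_ne _ _ _ _ (by omega)]
      exact hag k hk
    -- re-establish the counts invariant for the tail
    have hcv'' : ∀ b : Nat, b < 10 → counts'.getD b 0 = SBelow tmp d b + cntB s' d b := by
      intro b hb
      by_cases hbe : b = bIx x d
      · subst hbe; exact hcv'
      · rw [hcounts', getD_set_ne _ _ _ _ hbe, hcv b hb]
        have : ¬ (bIx x d = b) := fun hh => hbe hh.symm
        simp [cntB, this]
    -- identify the step with the normalised state, then use the induction hypothesis
    rw [hcset, hgetc, ← hiV, ← hns', ← hjV, haset]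
    exact ih (p ++ [x]) counts' ns' (states ++ [(a.set iV.toNat x).set jV.toNat (PySem.List.pyGetD a iV 0)])
        ((a.set iV.toNat x).set jV.toNat (PySem.List.pyGetD a iV 0))
        (by rw [hsu]; simp) hc10' hcv'' hnsB hal' hag'

theorem partition_conf (arr : List Int) (lo hi d : Int)
    (hlo : 0 ≤ lo) (hlt : lo < hi) (hhi : hi ≤ (arr.length : Int)) :
    (partitionPass arr lo hi d).2.length = arr.length ∧
    ∀ k : Nat, ((k : Int) < lo ∨ hi ≤ (k : Int)) →
      (partitionPass arr lo hi d).2.getD k 0 = arr.getD k 0 := by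
  have h0hi : (0:Int) ≤ hi := le_trans hlo (le_of_lt hlt)
  have htl : ((PySem.List.slice arr (some lo) (some hi)).length : Int) ≤ hi - lo := by
    rw [PySem.List.slice_toNat arr hlo h0hi]
    simp only [List.length_take, List.length_drop]
    push_cast
    omega
  obtain ⟨hc10, hcv0⟩ := prefixCounts_spec (PySem.List.slice arr (some lo) (some hi)) d
  have hmain := partition_fold_conf arr lo hi d (PySem.List.slice arr (some lo) (some hi))
      hlo hhi htl (PySem.List.slice arr (some lo) (some hi)) []
      (prefixCounts (buildCounts (PySem.List.slice arr (some lo) (some hi)) d))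
      (PySem.Set.ofList (PySem.List.pyRange lo hi 1)) [] arr rfl hc10
      (fun b hb => by rw [hcv0 b hb, SBelow_succ])
      (fun y hy => PySem.List.mem_pyRange_one.mp ((PySem.Set.mem_ofList _ y).mp hy))
      rfl (fun k _ => rfl)
  exact hmain

-- ---- confinement of A's recursion ----

def RecConf (f : Nat) : Prop :=
  ∀ (a : List Int) (i j d' : Int), 0 ≤ i → j ≤ (a.length : Int) →
    (recA f a i j d').2.length = a.length ∧
    ∀ k : Nat, ((k : Int) < i ∨ j ≤ (k : Int)) →
      (recA f a i j d').2.getD k 0 = a.getD k 0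

theorem scanA_conf (f : Nat) (hP : RecConf f) (lo hi d : Int) (hlo : 0 ≤ lo) :
    ∀ (js : List Int) (i pl : Int) (a : List Int) (s : List (List Int)),
      lo ≤ i → (∀ j ∈ js, lo ≤ j ∧ j ≤ hi) → hi ≤ (a.length : Int) →
      ((scanA f js i pl d a s hi).2.2.2.length = a.length ∧
       lo ≤ (scanA f js i pl d a s hi).1 ∧
       ∀ k : Nat, ((k : Int) < lo ∨ hi ≤ (k : Int)) →
         (scanA f js i pl d a s hi).2.2.2.getD k 0 = a.getD k 0) := by
  intro js
  induction js with
  | nil =>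
    intro i pl a s hli _ _
    rw [scanA]
    exact ⟨rfl, hli, fun k _ => rfl⟩
  | cons j js ih =>
    intro i pl a s hli hjs hhia
    have hjb := hjs j (by simp)
    rw [scanA]
    by_cases hc : pyBucket (PySem.List.pyGetD a j 0) d ≠ pl
    · rw [if_pos hc]
      obtain ⟨hcl, hcg⟩ := hP a i j (PySem.Int.floordiv d 10) (by omega) (by omega)
      obtain ⟨hl2, hi2, hg2⟩ := ih j (pyBucket (PySem.List.pyGetD (recA f a i j (PySem.Int.floordiv d 10)).2 j 0) d)
          (recA f a i j (PySem.Int.floordiv d 10)).2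
          (s ++ (recA f a i j (PySem.Int.floordiv d 10)).1)
          hjb.1 (fun j' hj' => hjs j' (by simp [hj'])) (by rw [hcl]; exact hhia)
      refine ⟨by rw [hl2, hcl], hi2, ?_⟩
      intro k hk
      rw [hg2 k hk, hcg k (by omega)]
    · rw [if_neg hc]
      exact ih i pl a s hli (fun j' hj' => hjs j' (by simp [hj'])) hhia

theorem recA_conf (f : Nat) : RecConf f := by
  induction f with
  | zero =>
    intro a i j d' _ _
    rw [recA]
    exact ⟨rfl, fun _ _ => rfl⟩
  | succ f ih =>
    intro a i j d' h0i hjl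
    rw [recA]
    by_cases hg : d' = 0 ∨ j - i < 2
    · rw [if_pos hg]
      exact ⟨rfl, fun _ _ => rfl⟩
    · rw [if_neg hg]
      have h2 : 2 ≤ j - i := by omega
      obtain ⟨hpl, hpg⟩ := partition_conf a i j d' h0i (by omega) hjl
      obtain ⟨hsl, hsi, hsg⟩ := scanA_conf f ih i j d' h0i
          (PySem.List.pyRange (i + 1) j 1) i
          (pyBucket (PySem.List.pyGetD (partitionPass a i j d').2 i 0) d')
          (partitionPass a i j d').2 (partitionPass a i j d').1
          le_rfl
          (fun j' hj' => by
            have := PySem.List.mem_pyRange_one.mp hj'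
            omega)
          (by rw [hpl]; exact hjl)
      obtain ⟨hrl, hrg⟩ := ih (scanA f (PySem.List.pyRange (i + 1) j 1) i
            (pyBucket (PySem.List.pyGetD (partitionPass a i j d').2 i 0) d') d'
            (partitionPass a i j d').2 (partitionPass a i j d').1 j).2.2.2
          (scanA f (PySem.List.pyRange (i + 1) j 1) i
            (pyBucket (PySem.List.pyGetD (partitionPass a i j d').2 i 0) d') d'
            (partitionPass a i j d').2 (partitionPass a i j d').1 j).1
          j (PySem.Int.floordiv d' 10) (by omega) (by rw [hsl, hpl]; exact hjl)
      refine ⟨by rw [hrl, hsl, hpl], ?_⟩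
      intro k hk
      rw [hrg k (by omega), hsg k hk, hpg k hk]

-- ---- the B-side scan: accumulator normalisation and chain shape ----

theorem scanB_acc (d : Int) (a1 : List Int) :
    ∀ (js : List Int) (i pl : Int) (cs : List (Int × Int × Int)),
      scanB js i pl d cs a1 =
        ((scanB js i pl d [] a1).1, (scanB js i pl d [] a1).2.1,
         cs ++ (scanB js i pl d [] a1).2.2) := by
  intro js
  induction js with
  | nil => intro i pl cs; simp [scanB]
  | cons j js ih =>
    intro i pl cs
    simp only [scanB]
    by_cases hc : pyBucket (PySem.List.pyGetD a1 j 0) d ≠ pl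
    · rw [if_pos hc, if_pos hc, ih j (pyBucket (PySem.List.pyGetD a1 j 0) d) (cs ++ [(i, j, PySem.Int.floordiv d 10)]),
        ih j (pyBucket (PySem.List.pyGetD a1 j 0) d) ([] ++ [(i, j, PySem.Int.floordiv d 10)])]
      simp
    · rw [if_neg hc, if_neg hc]
      exact ih i pl cs

-- contiguous intervals from p to q
inductive Chain : Int → List (Int × Int × Int) → Int → Prop
  | nil (i : Int) : Chain i [] i
  | cons {a b c d' : Int} {cs : List (Int × Int × Int)} :
      a < b → Chain b cs c → Chain a ((a, b, d') :: cs) c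

theorem Chain.append_single {p q r d' : Int} {cs : List (Int × Int × Int)}
    (h : Chain p cs q) (hlt : q < r) : Chain p (cs ++ [(q, r, d')]) r := by
  induction h with
  | nil i => exact Chain.cons hlt (Chain.nil r)
  | cons hab _ ih => exact Chain.cons hab (ih hlt)

theorem Chain.bounds {p q : Int} {cs : List (Int × Int × Int)} (h : Chain p cs q) :
    p ≤ q ∧ ∀ t ∈ cs, p ≤ t.1 ∧ t.1 < t.2.1 ∧ t.2.1 ≤ q := by
  induction h with
  | nil i => exact ⟨le_rfl, by simp⟩
  | cons hab hch ih =>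
    refine ⟨by omega, ?_⟩
    intro t ht
    rcases List.mem_cons.mp ht with h1 | h2
    · subst h1
      refine ⟨le_rfl, hab, ?_⟩
      have := ih.1
      omega
    · obtain ⟨u1, u2, u3⟩ := ih.2 t h2
      exact ⟨by omega, u2, u3⟩

theorem scanB_chain (d : Int) (a1 : List Int) (hi : Int) :
    ∀ (js : List Int) (i pl : Int),
      (∀ j ∈ js, i < j ∧ j < hi) → js.Pairwise (· < ·) →
      Chain i (scanB js i pl d [] a1).2.2 (scanB js i pl d [] a1).1 ∧
      ((scanB js i pl d [] a1).1 = i ∨ (scanB js i pl d [] a1).1 ∈ js) := by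
  intro js
  induction js with
  | nil =>
    intro i pl _ _
    rw [scanB]
    exact ⟨Chain.nil i, Or.inl rfl⟩
  | cons j js ih =>
    intro i pl hjs hpw
    have hjb := hjs j (by simp)
    simp only [scanB]
    by_cases hc : pyBucket (PySem.List.pyGetD a1 j 0) d ≠ pl
    · rw [if_pos hc, scanB_acc d a1 js j (pyBucket (PySem.List.pyGetD a1 j 0) d) ([] ++ [(i, j, PySem.Int.floordiv d 10)])]
      obtain ⟨hch, hm⟩ := ih j (pyBucket (PySem.List.pyGetD a1 j 0) d)
          (fun j' hj' => ⟨(List.pairwise_cons.mp hpw).1 j' hj', (hjs j' (by simp [hj'])).2⟩)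
          (List.pairwise_cons.mp hpw).2
      constructor
      · simp only [List.nil_append, List.cons_append]
        exact Chain.cons hjb.1 hch
      · rcases hm with h1 | h2
        · exact Or.inr (by simp [h1])
        · exact Or.inr (by simp [h2])
    · rw [if_neg hc]
      obtain ⟨hch, hm⟩ := ih i pl (fun j' hj' => ⟨(hjs j' (by simp [hj'])).1, (hjs j' (by simp [hj'])).2⟩) (List.pairwise_cons.mp hpw).2
      refine ⟨hch, ?_⟩
      rcases hm with h1 | h2
      · exact Or.inl h1
      · exact Or.inr (by simp [h2])

theorem childrenOf_chain (a1 : List Int) (lo hi d : Int) (h2 : 2 ≤ hi - lo) :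
    Chain lo (childrenOf a1 lo hi d) hi := by
  unfold childrenOf
  obtain ⟨hch, hm⟩ := scanB_chain d a1 hi (PySem.List.pyRange (lo + 1) hi 1) lo
      (pyBucket (PySem.List.pyGetD a1 lo 0) d)
      (fun j hj => by have := PySem.List.mem_pyRange_one.mp hj; omega)
      (PySem.List.pairwise_lt_pyRange_one (lo + 1) hi)
  refine Chain.append_single hch ?_
  rcases hm with h1 | h2
  · omega
  · have := PySem.List.mem_pyRange_one.mp h2
    omega

-- each child's digit is d // 10
theorem scanB_dig (d : Int) (a1 : List Int) :
    ∀ (js : List Int) (i pl : Int) (t : _),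
      t ∈ (scanB js i pl d [] a1).2.2 → t.2.2 = PySem.Int.floordiv d 10 := by
  intro js
  induction js with
  | nil =>
    intro i pl t ht
    rw [scanB] at ht
    simp at ht
  | cons j js ih =>
    intro i pl t ht
    simp only [scanB] at ht
    by_cases hc : pyBucket (PySem.List.pyGetD a1 j 0) d ≠ pl
    · rw [if_pos hc, scanB_acc d a1 js j (pyBucket (PySem.List.pyGetD a1 j 0) d) ([] ++ [(i, j, PySem.Int.floordiv d 10)])] at ht
      simp only [List.nil_append, List.cons_append, List.mem_cons] at ht
      rcases ht with h1 | h2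
      · rw [h1]
      · exact ih j (pyBucket (PySem.List.pyGetD a1 j 0) d) t h2
    · rw [if_neg hc] at ht
      exact ih i pl t ht

theorem childrenOf_dig (a1 : List Int) (lo hi d : Int) :
    ∀ t ∈ childrenOf a1 lo hi d, t.2.2 = PySem.Int.floordiv d 10 := by
  intro t ht
  unfold childrenOf at ht
  simp only [List.mem_append, List.mem_singleton] at ht
  rcases ht with h1 | h2
  · exact scanB_dig d a1 _ _ _ t h1
  · rw [h2]

-- ---- restructuring A: the interleaved scan equals pre-computed children ----

def foldKids (f : Nat) : List (Int × Int × Int) → List Int → List (List Int) × List Int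
  | [], a => ([], a)
  | (i, j, d') :: cs, a =>
    let r := recA f a i j d'
    let r2 := foldKids f cs r.2
    (r.1 ++ r2.1, r2.2)

theorem foldKids_append (f : Nat) (cs cs' : List (Int × Int × Int)) :
    ∀ a, foldKids f (cs ++ cs') a =
      ((foldKids f cs a).1 ++ (foldKids f cs' (foldKids f cs a).2).1,
       (foldKids f cs' (foldKids f cs a).2).2) := by
  induction cs with
  | nil => intro a; simp [foldKids]
  | cons c cs ih =>
    intro a
    obtain ⟨i, j, d'⟩ := c
    simp only [List.cons_append, foldKids]
    rw [ih]
    simp [List.append_assoc]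

theorem scan_eq (f : Nat) (lo hi d : Int) (a1 : List Int)
    (hlo : 0 ≤ lo) (hhi : hi ≤ (a1.length : Int)) :
    ∀ (js : List Int) (i pl : Int) (a : List Int) (s : List (List Int)),
      (∀ j ∈ js, i < j ∧ j < hi) → js.Pairwise (· < ·) →
      lo ≤ i → a.length = a1.length →
      (∀ k : Nat, i ≤ (k : Int) → a.getD k 0 = a1.getD k 0) →
      scanA f js i pl d a s hi =
        ((scanB js i pl d [] a1).1, (scanB js i pl d [] a1).2.1,
         s ++ (foldKids f (scanB js i pl d [] a1).2.2 a).1,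
         (foldKids f (scanB js i pl d [] a1).2.2 a).2) := by
  intro js
  induction js with
  | nil =>
    intro i pl a s _ _ _ _ _
    rw [scanA, scanB]
    simp [foldKids]
  | cons j js ih =>
    intro i pl a s hjs hpw hli hlen hag
    have hjb := hjs j (by simp)
    have h0j : 0 ≤ j := by omega
    have hjlen : j < (a.length : Int) := by omega
    have hjlen1 : j < (a1.length : Int) := by omega
    have hread : PySem.List.pyGetD a j 0 = PySem.List.pyGetD a1 j 0 := by
      rw [pyGetD_toNat a j h0j hjlen, pyGetD_toNat a1 j h0j hjlen1]
      exact hag j.toNat (by omega)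
    rw [scanA, scanB]
    simp only [hread]
    by_cases hc : pyBucket (PySem.List.pyGetD a1 j 0) d ≠ pl
    · rw [if_pos hc, if_pos hc]
      obtain ⟨hcl, hcg⟩ := recA_conf f a i j (PySem.Int.floordiv d 10) (by omega) (by omega)
      have hplnew : pyBucket (PySem.List.pyGetD (recA f a i j (PySem.Int.floordiv d 10)).2 j 0) d
          = pyBucket (PySem.List.pyGetD a1 j 0) d := by
        rw [pyGetD_toNat _ j h0j (by rw [hcl]; exact hjlen), hcg j.toNat (by omega), ← hread,
          pyGetD_toNat a j h0j hjlen]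
      rw [hplnew]
      rw [ih j (pyBucket (PySem.List.pyGetD a1 j 0) d) (recA f a i j (PySem.Int.floordiv d 10)).2
          (s ++ (recA f a i j (PySem.Int.floordiv d 10)).1)
          (fun j' hj' => ⟨(List.pairwise_cons.mp hpw).1 j' hj', (hjs j' (by simp [hj'])).2⟩)
          (List.pairwise_cons.mp hpw).2
          (by omega)
          (by rw [hcl]; exact hlen)
          (fun k hk => by rw [hcg k (by omega)]; exact hag k (by omega))]
      rw [scanB_acc d a1 js j (pyBucket (PySem.List.pyGetD a1 j 0) d) ([] ++ [(i, j, PySem.Int.floordiv d 10)])]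
      simp only [List.nil_append, List.cons_append, foldKids]
      simp [List.append_assoc]
    · rw [if_neg hc, if_neg hc]
      exact ih i pl a s (fun j' hj' => ⟨(hjs j' (by simp [hj'])).1, (hjs j' (by simp [hj'])).2⟩)
        (List.pairwise_cons.mp hpw).2 hli hlen hag

theorem recA_restruct (f : Nat) (arr : List Int) (lo hi d : Int)
    (hg : ¬ (d = 0 ∨ hi - lo < 2)) (hlo : 0 ≤ lo) (hhi : hi ≤ (arr.length : Int)) :
    recA (f + 1) arr lo hi d =
      ((partitionPass arr lo hi d).1 ++
        (foldKids f (childrenOf (partitionPass arr lo hi d).2 lo hi d) (partitionPass arr lo hi d).2).1,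
       (foldKids f (childrenOf (partitionPass arr lo hi d).2 lo hi d) (partitionPass arr lo hi d).2).2) := by
  have h2 : 2 ≤ hi - lo := by omega
  obtain ⟨hpl, _⟩ := partition_conf arr lo hi d hlo (by omega) hhi
  have hhi1 : hi ≤ ((partitionPass arr lo hi d).2.length : Int) := by rw [hpl]; exact hhi
  simp only [recA]
  rw [if_neg hg]
  rw [scan_eq f lo hi d (partitionPass arr lo hi d).2 hlo hhi1
      (PySem.List.pyRange (lo + 1) hi 1) lo
      (pyBucket (PySem.List.pyGetD (partitionPass arr lo hi d).2 lo 0) d)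
      (partitionPass arr lo hi d).2 (partitionPass arr lo hi d).1
      (fun j hj => by have := PySem.List.mem_pyRange_one.mp hj; omega)
      (PySem.List.pairwise_lt_pyRange_one (lo + 1) hi)
      le_rfl rfl (fun _ _ => rfl)]
  unfold childrenOf
  rw [foldKids_append]
  simp only [foldKids]
  simp [List.append_assoc]

-- ---- fuel accounting for the stack loop ----

mutual
def cntT (f : Nat) (arr : List Int) (lo hi d : Int) : Nat :=
  match f with
  | 0 => 1
  | f + 1 =>
    if d = 0 ∨ hi - lo < 2 then 1
    else 1 + cntList f (partitionPass arr lo hi d).2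
              (childrenOf (partitionPass arr lo hi d).2 lo hi d)
  termination_by (f, 0)

def cntList (f : Nat) (a : List Int) : List (Int × Int × Int) → Nat
  | [] => 0
  | (i, j, d') :: cs => cntT f a i j d' + cntList f (recA f a i j d').2 cs
  termination_by cs => (f, cs.length + 1)
end

theorem chain_cons_inv {p q x y e : Int} {cs : List (Int × Int × Int)}
    (h : Chain p ((x, y, e) :: cs) q) : p = x ∧ x < y ∧ Chain y cs q := by
  cases h
  exact ⟨rfl, by assumption, by assumption⟩

theorem cntList_chain (f : Nat)
    (hIH : ∀ (arr : List Int) (lo hi d : Int), cntT f arr lo hi d ≤ 1 + (hi - lo).toNat * f) :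
    ∀ (cs : List (Int × Int × Int)) (p q : Int) (a : List Int),
      Chain p cs q → cntList f a cs ≤ (q - p).toNat * (f + 1) := by
  intro cs
  induction cs with
  | nil =>
    intro p q a hch
    cases hch
    simp [cntList]
  | cons c cs ih =>
    intro p q a hch
    obtain ⟨x, y, e⟩ := c
    obtain ⟨hpx, hxy, hch'⟩ := chain_cons_inv hch
    rw [cntList]
    have h1 := hIH a x y e
    have h2 := ih y q (recA f a x y e).2 hch'
    have h3 : y ≤ q := (Chain.bounds hch').1
    have hA : 1 ≤ (y - x).toNat := by omega
    have hsum : (q - p).toNat = (y - x).toNat + (q - y).toNat := by omega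
    rw [hsum]
    have he : ((y - x).toNat + (q - y).toNat) * (f + 1)
        = ((y - x).toNat * f + (y - x).toNat) + (q - y).toNat * (f + 1) := by ring
    rw [he]
    omega

theorem cnt_le : ∀ (f : Nat) (arr : List Int) (lo hi d : Int),
    cntT f arr lo hi d ≤ 1 + (hi - lo).toNat * f := by
  intro f
  induction f with
  | zero =>
    intro arr lo hi d
    rw [cntT]
    omega
  | succ f ih =>
    intro arr lo hi d
    rw [cntT]
    by_cases hg : d = 0 ∨ hi - lo < 2
    · rw [if_pos hg]; omega
    · rw [if_neg hg]
      have h2 : 2 ≤ hi - lo := by omega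
      have hch := childrenOf_chain (partitionPass arr lo hi d).2 lo hi d h2
      have := cntList_chain f ih (childrenOf (partitionPass arr lo hi d).2 lo hi d) lo hi
          (partitionPass arr lo hi d).2 hch
      omega

-- ---- the stack loop computes the recursion ----

theorem loopB_nil : ∀ (f : Nat) (arr : List Int), loopB f [] arr = ([], arr) := by
  intro f arr
  cases f <;> rw [loopB]

theorem loop_eq : ∀ (f : Nat) (arr : List Int) (lo hi d : Int)
    (stack : List (Int × Int × Int)) (g : Nat),
    0 ≤ d → d.toNat < f → 0 ≤ lo → hi ≤ (arr.length : Int) →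
    loopB (cntT f arr lo hi d + g) ((lo, hi, d) :: stack) arr =
      ((recA f arr lo hi d).1 ++ (loopB g stack (recA f arr lo hi d).2).1,
       (loopB g stack (recA f arr lo hi d).2).2) := by
  intro f
  induction f with
  | zero =>
    intro arr lo hi d stack g _ hf
    omega
  | succ f ih =>
    intro arr lo hi d stack g h0d hf hlo hhi
    rw [cntT]
    by_cases hg : d = 0 ∨ hi - lo < 2
    · rw [if_pos hg]
      rw [Nat.add_comm 1 g, loopB, if_pos hg]
      rw [recA, if_pos hg]
      simp
    · rw [if_neg hg]
      have h2 : 2 ≤ hi - lo := by omega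
      have h0dp : 0 < d := by omega
      obtain ⟨hpl, _⟩ := partition_conf arr lo hi d hlo (by omega) hhi
      have hch := childrenOf_chain (partitionPass arr lo hi d).2 lo hi d h2
      have hbnds := Chain.bounds hch
      -- process the pushed children left to right
      have hkids : ∀ (cs : List (Int × Int × Int)), (∀ t ∈ cs, t.2.2 = PySem.Int.floordiv d 10 ∧ 0 ≤ t.1 ∧ t.2.1 ≤ hi) →
          ∀ (a : List Int) (stack : List (Int × Int × Int)) (g : Nat), hi ≤ (a.length : Int) →
          loopB (cntList f a cs + g) (cs ++ stack) a =
            ((foldKids f cs a).1 ++ (loopB g stack (foldKids f cs a).2).1,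
             (loopB g stack (foldKids f cs a).2).2) := by
        intro cs
        induction cs with
        | nil =>
          intro _ a stack g _
          simp [cntList, foldKids]
        | cons c cs ihc =>
          intro hmem a stack g hia
          obtain ⟨x, y, e⟩ := c
          obtain ⟨he, hx0, hyhi⟩ := hmem (x, y, e) (by simp)
          have hx0' : 0 ≤ x := hx0
          have hyhi' : y ≤ hi := hyhi
          have hfd : 0 ≤ PySem.Int.floordiv d 10 := by
            rw [PySem.Int.floordiv_eq_ediv_of_pos (by omega)]
            omega
          have hfdlt : (PySem.Int.floordiv d 10).toNat < f := by
            rw [PySem.Int.floordiv_eq_ediv_of_pos (by omega)]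
            omega
          rw [cntList, List.cons_append, Nat.add_assoc]
          rw [ih a x y e (cs ++ stack) (cntList f (recA f a x y e).2 cs + g)
            (by rw [show e = PySem.Int.floordiv d 10 from he]; exact hfd)
            (by rw [show e = PySem.Int.floordiv d 10 from he]; exact hfdlt) hx0' (by omega)]
          obtain ⟨hcl, _⟩ := recA_conf f a x y e hx0' (by omega)
          rw [ihc (fun t ht => hmem t (by simp [ht])) (recA f a x y e).2 stack g (by rw [hcl]; exact hia)]
          simp only [foldKids]
          simp [List.append_assoc]
      have hmemk : ∀ t ∈ childrenOf (partitionPass arr lo hi d).2 lo hi d,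
          t.2.2 = PySem.Int.floordiv d 10 ∧ 0 ≤ t.1 ∧ t.2.1 ≤ hi := by
        intro t ht
        refine ⟨childrenOf_dig _ _ _ _ t ht, ?_, ?_⟩
        · have := hbnds.2 t ht; omega
        · exact (hbnds.2 t ht).2.2
      rw [Nat.add_assoc, Nat.add_comm 1]
      simp only [loopB]
      rw [if_neg hg]
      rw [hkids (childrenOf (partitionPass arr lo hi d).2 lo hi d) hmemk
        (partitionPass arr lo hi d).2 stack g (by rw [hpl]; exact hhi)]
      rw [recA_restruct f arr lo hi d hg hlo hhi]
      simp [List.append_assoc]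

-- ---- top level ----

theorem initDigit_pos : ∀ (t g : Int), 0 < g → 0 < initDigit t g := by
  intro t g hg
  fun_induction initDigit t g with
  | case1 t g h ih => exact ih (by omega)
  | case2 t g h => exact hg

theorem top_eq (arr : List Int) (l h d : Int)
    (hPre : d = 0 ∨ h - l < 2 ∨ (0 < d ∧ 0 ≤ l ∧ h ≤ (arr.length : Int))) :
    recA (d.toNat + 1) arr l h d =
      loopB (1 + arr.length * (d.toNat + 1)) [(l, h, d)] arr := by
  by_cases htr : d = 0 ∨ h - l < 2
  · rw [recA, if_pos htr]
    rw [Nat.add_comm 1 (arr.length * (d.toNat + 1))]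
    simp only [loopB]
    rw [if_pos htr, loopB_nil]
  · obtain ⟨h0d, h0l, hlen⟩ : 0 < d ∧ 0 ≤ l ∧ h ≤ (arr.length : Int) := by tauto
    have hcnt := cnt_le (d.toNat + 1) arr l h d
    have hml : (h - l).toNat * (d.toNat + 1) ≤ arr.length * (d.toNat + 1) :=
      Nat.mul_le_mul_right _ (by omega)
    obtain ⟨g, hg⟩ := Nat.le.dest (show cntT (d.toNat + 1) arr l h d ≤ 1 + arr.length * (d.toNat + 1) by omega)
    rw [← hg, loop_eq (d.toNat + 1) arr l h d [] g (by omega) (by omega) h0l hlen]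
    rw [loopB_nil]
    simp

-- ===== VERDICT (by name: the statement is the Claim_ definition above) =====
theorem msd_sort_spec : Claim_equal_msd_sort := by
  intro arr lo hi digit _ hPre
  unfold Spec_msd_sort msd_sort msd_sort_alt
  rcases lo with _ | l <;> rcases hi with _ | h <;> rcases digit with _ | d <;>
    simp only [msdInit] <;>
    first
      | rw [top_eq arr 0 (arr.length : Int)
          (initDigit ((PySem.List.max? arr (fun y => y)).getD 0) 1)
          (Or.inr (Or.inr ⟨initDigit_pos _ 1 one_pos, le_rfl, le_rfl⟩))]
      | rw [top_eq arr l h d (by simpa [Pre_msd_sort] using hPre)]
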